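-- pv_equiv track=rewrite | github.com/iAdani/HackerRankSolutions | Gemstones.py | gemstones
-- ===== SOURCE A (Python) =====
-- def gemstones(arr):
--     d = {}
--     for collection in arr:
--         collection = set(collection)
--         for stone in collection:
--             count = d.get(stone, 0)
--             d[stone] = count + 1
--
--     count = 0
--     for value in d.values():
--         if value == len(arr):
--             count += 1
--
--     return count
-- ===== SOURCE B (Python) =====
-- def gemstones(arr):
--     if not arr:
--         return 0
--     result = set(arr[0])
--     for collection in arr[1:]:
--         result &= set(collection)
--     return len(result)
-- ===== Notes on version B (the rewrite author's own statement) =====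
-- stated objective: idiomatic
-- what changed: Replaces the per-character frequency dict plus a second counting pass over its values with a single shrinking set intersected with each collection, returning its size.
import Mathlib
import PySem

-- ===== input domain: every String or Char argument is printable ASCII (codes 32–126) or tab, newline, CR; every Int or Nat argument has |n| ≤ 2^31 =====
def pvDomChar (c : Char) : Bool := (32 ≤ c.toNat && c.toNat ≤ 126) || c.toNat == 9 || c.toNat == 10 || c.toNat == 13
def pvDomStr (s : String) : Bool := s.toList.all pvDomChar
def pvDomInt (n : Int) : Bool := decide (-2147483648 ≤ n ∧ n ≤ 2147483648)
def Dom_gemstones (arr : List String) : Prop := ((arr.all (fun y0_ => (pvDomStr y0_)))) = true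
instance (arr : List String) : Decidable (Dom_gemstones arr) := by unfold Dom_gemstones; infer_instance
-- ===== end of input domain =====

-- B replaces A's per-character frequency dict and second counting pass with a
-- single shrinking set intersected with each collection (more idiomatic).

-- ===== PORT A =====
def gemstones (arr : List String) : Int :=
  let d : PySem.Dict Char Int :=
    arr.foldl (fun d collection =>
      (PySem.Set.ofList collection.toList).foldl
        (fun d stone => d.insert stone (d.getD stone 0 + 1)) d)
      PySem.Dict.empty
  d.values.foldl (fun count value =>
    if value == (arr.length : Int) then count + 1 else count) 0

-- ===== PORT B =====
def gemstones_alt (arr : List String) : Int :=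
  match arr with
  | [] => 0
  | first :: rest =>
    ((rest.foldl (fun result collection =>
        PySem.Set.inter result (PySem.Set.ofList collection.toList))
      (PySem.Set.ofList first.toList)).length : Int)

-- ===== PRECONDITION & SPEC =====
def Spec_gemstones (arr : List String) (out : Int) : Prop := out = gemstones_alt arr
instance (arr : List String) (out : Int) : Decidable (Spec_gemstones arr out) := by unfold Spec_gemstones; infer_instance

-- ===== CLAIM (what is proved, stated in full; the proofs are below) =====
def Claim_equal_gemstones : Prop := ∀ (arr : List String), Dom_gemstones arr → Spec_gemstones arr (gemstones arr)

-- ===== LEMMAS AND PROOFS =====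

-- proof-side name for A's dict-building loop
def buildD (arr : List String) : PySem.Dict Char Int :=
  arr.foldl (fun d collection =>
    (PySem.Set.ofList collection.toList).foldl
      (fun d stone => d.insert stone (d.getD stone 0 + 1)) d)
    PySem.Dict.empty

theorem gemstones_eq (arr : List String) :
    gemstones arr = (buildD arr).values.foldl (fun count value =>
      if value == (arr.length : Int) then count + 1 else count) 0 := rfl

-- A's dict after the outer loop: each key holds the number of collections containing it.
theorem getD_buildDict (arr : List String) (d : PySem.Dict Char Int) (c : Char) :
    (arr.foldl (fun d collection =>
      (PySem.Set.ofList collection.toList).foldl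
        (fun d stone => d.insert stone (d.getD stone 0 + 1)) d) d).getD c 0
    = d.getD c 0 + (arr.countP (fun s => decide (c ∈ s.toList)) : Int) := by
  induction arr generalizing d with
  | nil => simp
  | cons s rest ih =>
    simp only [List.foldl_cons, ih, PySem.Dict.getD_foldl_insert_add_one,
      List.countP_cons]
    by_cases h : c ∈ s.toList
    · rw [List.count_eq_one_of_mem (PySem.Set.nodup_ofList _)
        ((PySem.Set.mem_ofList _ _).mpr h)]
      simp [h]
      ring
    · rw [List.count_eq_zero_of_not_mem (fun hm => h ((PySem.Set.mem_ofList _ _).mp hm))]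
      simp [h]

theorem mem_keys_buildDict (arr : List String) (d : PySem.Dict Char Int) (c : Char) :
    c ∈ (arr.foldl (fun d collection =>
      (PySem.Set.ofList collection.toList).foldl
        (fun d stone => d.insert stone (d.getD stone 0 + 1)) d) d).keys
    ↔ c ∈ d.keys ∨ ∃ s ∈ arr, c ∈ s.toList := by
  induction arr generalizing d with
  | nil => simp
  | cons s rest ih =>
    simp only [List.foldl_cons, ih, PySem.Dict.keys_foldl_insert,
      PySem.Set.mem_update, PySem.Set.mem_ofList, List.mem_cons]
    constructor
    · rintro (⟨h | h⟩ | ⟨t, ht, hc⟩)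
      · exact Or.inl h
      · exact Or.inr ⟨s, Or.inl rfl, h⟩
      · exact Or.inr ⟨t, Or.inr ht, hc⟩
    · rintro (h | ⟨t, (rfl | ht), hc⟩)
      · exact Or.inl (Or.inl h)
      · exact Or.inl (Or.inr hc)
      · exact Or.inr ⟨t, ht, hc⟩

theorem nodup_keys_buildD (arr : List String) : (buildD arr).keys.Nodup := by
  unfold buildD
  generalize hgen : PySem.Dict.empty = d0
  have h0 : (d0 : PySem.Dict Char Int).keys.Nodup := by rw [← hgen]; simp
  clear hgen
  induction arr generalizing d0 with
  | nil => exact h0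
  | cons s rest ih =>
    exact ih _ (PySem.Dict.nodup_keys_foldl_insert _ _ _ h0)

-- B's loop: intersecting in turn leaves exactly the elements present in every collection.
theorem foldl_inter_eq_filter (rest : List String) (r : PySem.Set Char) :
    rest.foldl (fun result collection =>
        PySem.Set.inter result (PySem.Set.ofList collection.toList)) r
    = r.filter (fun c => rest.all (fun s => decide (c ∈ s.toList))) := by
  induction rest generalizing r with
  | nil => simp
  | cons s rest ih =>
    rw [List.foldl_cons, ih, PySem.Set.inter]
    simp only [PySem.Set.contains, List.filter_filter, List.all_cons]
    apply List.filter_congr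
    intro c _
    simp [PySem.Set.mem_ofList, Bool.and_comm]

-- counting distinct elements satisfying P in a Nodup list is a Finset cardinality
theorem countP_eq_card (L : List Char) (hL : L.Nodup) (P : Char → Bool) :
    L.countP P = (L.toFinset.filter (fun c => P c = true)).card := by
  rw [← List.toFinset_filter, List.toFinset_card_of_nodup (hL.filter P),
    List.countP_eq_length_filter]

-- ===== VERDICT (by name: the statement is the Claim_ definition above) =====
theorem gemstones_spec : Claim_equal_gemstones := by
  unfold Claim_equal_gemstones
  intro arr _
  unfold Spec_gemstones
  cases arr with
  | nil => decide
  | cons first rest =>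
    show gemstones (first :: rest)
        = ((rest.foldl (fun result collection =>
            PySem.Set.inter result (PySem.Set.ofList collection.toList))
          (PySem.Set.ofList first.toList)).length : Int)
    rw [gemstones_eq]
    have hnd : (buildD (first :: rest)).keys.Nodup := nodup_keys_buildD _
    rw [PySem.List.foldl_beq_add_one, zero_add,
      PySem.Dict.values_eq_map_keys _ hnd 0, foldl_inter_eq_filter]
    have hcount : ∀ c : Char,
        (buildD (first :: rest)).getD c 0 = ((first :: rest).length : Int)
        ↔ ∀ s ∈ first :: rest, c ∈ s.toList := by
      intro c
      rw [buildD, getD_buildDict]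
      simp only [PySem.Dict.getD_empty, zero_add, Nat.cast_inj,
        List.countP_eq_length, decide_eq_true_eq]
    rw [List.count_eq_countP, List.countP_map]
    have hP : List.countP ((fun x => x == (((first :: rest).length : Nat) : Int))
          ∘ fun k => (buildD (first :: rest)).getD k 0) (buildD (first :: rest)).keys
        = List.countP (fun c => (first :: rest).all (fun s => decide (c ∈ s.toList)))
            (buildD (first :: rest)).keys := by
      apply List.countP_congr
      intro c _
      rw [Function.comp_apply, Bool.eq_iff_iff]
      simpa using hcount c
    rw [hP, ← List.countP_eq_length_filter]
    have hQ : List.countP (fun c => rest.all (fun s => decide (c ∈ s.toList)))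
          (PySem.Set.ofList first.toList)
        = List.countP (fun c => (first :: rest).all (fun s => decide (c ∈ s.toList)))
          (PySem.Set.ofList first.toList) := by
      apply List.countP_congr
      intro c hc
      have hcf : c ∈ first.toList := (PySem.Set.mem_ofList _ _).mp hc
      simp [hcf]
    rw [hQ]
    rw [countP_eq_card _ hnd, countP_eq_card _ (PySem.Set.nodup_ofList _)]
    apply congrArg
    apply congrArg Finset.card
    apply Finset.ext
    intro c
    simp only [Finset.mem_filter, List.mem_toFinset, PySem.Set.mem_ofList,
      List.all_eq_true, decide_eq_true_eq]
    constructor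
    · rintro ⟨-, hall⟩
      exact ⟨hall first (by simp), hall⟩
    · rintro ⟨hcf, hall⟩
      refine ⟨?_, hall⟩
      exact ((mem_keys_buildDict _ _ _).mpr (Or.inr ⟨first, by simp, hcf⟩))
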